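-- pv_equiv track=rewrite | github.com/loopwerk/Bonsai | Scripts/generate_hashes.py | fnv_hash_lowered
-- ===== SOURCE A (Python) =====
-- def fnv_hash_lowered(s):
--     """FNV-1a hash with ASCII lowercasing (matches fnvHashLowered in Swift)."""
--     h = 14695981039346656037
--     for b in s.encode("ascii"):
--         if 0x41 <= b <= 0x5A:
--             b = b | 0x20
--         h ^= b
--         h = (h * 1099511628211) & 0xFFFFFFFFFFFFFFFF
--     return h
-- ===== SOURCE B (Python) =====
-- def fnv_hash_lowered(s):
--     """FNV-1a hash with ASCII lowercasing (matches fnvHashLowered in Swift)."""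
--     data = s.encode("ascii")
--
--     def go(h, lo, hi):
--         # fold the FNV-1a step over data[lo:hi] by splitting the range in half
--         if hi - lo == 0:
--             return h
--         if hi - lo == 1:
--             b = data[lo]
--             if 0x41 <= b <= 0x5A:
--                 b |= 0x20
--             return ((h ^ b) * 1099511628211) & 0xFFFFFFFFFFFFFFFF
--         mid = (lo + hi) // 2
--         return go(go(h, lo, mid), mid, hi)
--
--     return go(14695981039346656037, 0, len(data))
-- ===== Notes on version B (the rewrite author's own statement) =====
-- stated objective: alternative
-- what changed: B replaces A's single left-to-right loop with a divide-and-conquer recursion over byte ranges: the range is split in half, the accumulator is threaded through the left half and then the right half, with a one-byte base case doing the lowercase/xor/multiply step; recursion depth is O(log n).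
import Mathlib
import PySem

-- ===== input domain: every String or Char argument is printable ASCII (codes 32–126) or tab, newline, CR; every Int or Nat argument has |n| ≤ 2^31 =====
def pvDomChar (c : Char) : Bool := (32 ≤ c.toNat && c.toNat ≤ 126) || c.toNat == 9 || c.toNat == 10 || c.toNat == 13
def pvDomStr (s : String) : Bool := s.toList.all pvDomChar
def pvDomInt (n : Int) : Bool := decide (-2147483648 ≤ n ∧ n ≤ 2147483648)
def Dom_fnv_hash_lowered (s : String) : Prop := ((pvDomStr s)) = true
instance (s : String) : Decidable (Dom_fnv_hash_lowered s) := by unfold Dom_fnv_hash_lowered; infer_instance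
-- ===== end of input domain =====

-- B folds the FNV-1a step by divide-and-conquer recursion over byte ranges (accumulator threaded
-- left half then right half) instead of A's linear loop; same O(n) cost, an alternative decomposition.


-- ===== PORT A =====
-- s.encode("ascii") on the ASCII domain yields the chars' code points; the loop lowercases
-- A-Z inline (b | 0x20), xors, multiplies, masks to 64 bits. Exact on Dom (all codes < 128).
def fnvStepA (h : Nat) (c : Char) : Nat :=
  let b0 := c.toNat
  let b := if 0x41 ≤ b0 ∧ b0 ≤ 0x5A then b0 ||| 0x20 else b0
  ((h ^^^ b) * 1099511628211) &&& 0xFFFFFFFFFFFFFFFF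

def fnv_hash_lowered (s : String) : Int :=
  ((s.toList.foldl fnvStepA 14695981039346656037 : Nat) : Int)

-- ===== PORT B =====
-- Source B folds the FNV-1a step over data[lo:hi] by divide-and-conquer: split the range at
-- mid = (lo+hi)//2, thread the accumulator through the left half, then the right half;
-- the one-byte base case lowercases A-Z and does the xor/multiply/mask step.
-- The extra fuel argument (passed as hi - lo at the top call) only makes the recursion
-- structural; it never alters the computation, since fuel ≥ hi - lo throughout.
-- data[lo] is ported as getD (the recursion only reaches lo < data.length).
def goB (data : List Char) : Nat → Nat → Nat → Nat → Nat
  | 0, h, _, _ => h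
  | fuel + 1, h, lo, hi =>
    if hi - lo = 0 then h
    else if hi - lo = 1 then
      let b0 := (data.getD lo default).toNat
      let b := if 0x41 ≤ b0 ∧ b0 ≤ 0x5A then b0 ||| 0x20 else b0
      ((h ^^^ b) * 1099511628211) &&& 0xFFFFFFFFFFFFFFFF
    else
      goB data fuel (goB data fuel h lo ((lo + hi) / 2)) ((lo + hi) / 2) hi

def fnv_hash_lowered_alt (s : String) : Int :=
  ((goB s.toList s.toList.length 14695981039346656037 0 s.toList.length : Nat) : Int)

-- ===== PRECONDITION & SPEC =====
def Spec_fnv_hash_lowered (s : String) (out : Int) : Prop := out = fnv_hash_lowered_alt s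
instance (s : String) (out : Int) : Decidable (Spec_fnv_hash_lowered s out) := by unfold Spec_fnv_hash_lowered; infer_instance

-- ===== CLAIM (what is proved, stated in full; the proofs are below) =====
def Claim_equal_fnv_hash_lowered : Prop := ∀ (s : String), Dom_fnv_hash_lowered s → Spec_fnv_hash_lowered s (fnv_hash_lowered s)

-- ===== LEMMAS AND PROOFS =====
-- with enough fuel, the divide-and-conquer recursion computes the left fold of fnvStepA over data[lo:hi]
lemma goB_eq_foldl (data : List Char) :
    ∀ (fuel h lo hi : Nat), hi - lo ≤ fuel → hi ≤ data.length →
      goB data fuel h lo hi = ((data.drop lo).take (hi - lo)).foldl fnvStepA h := by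
  intro fuel
  induction fuel with
  | zero =>
    intro h lo hi hn _
    have h0 : hi - lo = 0 := by omega
    rw [goB, h0, List.take_zero, List.foldl_nil]
  | succ m ih =>
    intro h lo hi hn hle
    rw [goB]
    by_cases h0 : hi - lo = 0
    · rw [if_pos h0, h0, List.take_zero, List.foldl_nil]
    · rw [if_neg h0]
      by_cases h1 : hi - lo = 1
      · have hlt : lo < data.length := by omega
        rw [if_pos h1, h1, List.drop_eq_getElem_cons hlt,
            List.take_succ_cons, List.take_zero, List.foldl_cons, List.foldl_nil,
            List.getD_eq_getElem data default hlt]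
        rfl
      · rw [if_neg h1,
            ih h lo ((lo + hi) / 2) (by omega) (by omega),
            ih _ ((lo + hi) / 2) hi (by omega) hle]
        have hsplit : (data.drop lo).take (hi - lo)
            = (data.drop lo).take ((lo + hi) / 2 - lo)
              ++ (data.drop ((lo + hi) / 2)).take (hi - (lo + hi) / 2) := by
          have hadd : hi - lo = ((lo + hi) / 2 - lo) + (hi - (lo + hi) / 2) := by omega
          rw [hadd, List.take_add, List.drop_drop]
          have hx : lo + ((lo + hi) / 2 - lo) = (lo + hi) / 2 := by omega
          rw [hx]
        rw [hsplit, List.foldl_append]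

-- ===== VERDICT (by name: the statement is the Claim_ definition above) =====
theorem fnv_hash_lowered_spec : Claim_equal_fnv_hash_lowered := by
  intro s _
  unfold Spec_fnv_hash_lowered fnv_hash_lowered fnv_hash_lowered_alt
  rw [goB_eq_foldl s.toList s.toList.length _ 0 s.toList.length (by omega) le_rfl]
  simp only [Nat.sub_zero, List.drop_zero, List.take_length]
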